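-- pv_equiv track=rewrite | github.com/mattiasandri/usertransmitter | functions.py | BinPolyMul
-- ===== SOURCE A (Python) =====
-- def BinPolyMul(b1,b2):
-- 	result=[]
-- 	for i in range(0,len(b1)+len(b2)-1):
-- 		result.append(0)
-- 	for i in range(0,len(b1)):
-- 		if b1[i]==0:
-- 			continue;
-- 		for j in range(0,len(b2)):
-- 			if b2[j]==0:
-- 				continue
-- 			sumDegree=i+j
-- 			result[sumDegree]=1
-- 	result=optiSizeVec(result)
-- 	return result
--
-- def optiSizeVec(vec):
-- 	optiVec=[]
-- 	if len(vec)==0: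
-- 		return optiVec
-- 	if len(vec)==1:
-- 		if vec[0]==1:
-- 			return vec
-- 		else:
-- 			return optiVec
-- 	for i in range(1,len(vec)+1):
-- 		if vec[-i]==0:
-- 			continue
-- 		else:
-- 			for j in range(-len(vec),-i+1):
-- 				optiVec.append(vec[j])
-- 			break;
-- 	return optiVec
-- ===== SOURCE B (Python) =====
-- def _or_shifts(s, b):
--     # OR together s shifted left by every index of a nonzero entry of b
--     m = 0
--     for i, v in enumerate(b):
--         if v != 0:
--             m |= s << i
--     return m
--
-- def BinPolyMul(b1, b2):
--     # bit-parallel OR-convolution: the whole product lives in one big integer;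
--     # bit_length() trims the trailing zeros for free
--     acc = _or_shifts(_or_shifts(1, b2), b1)
--     return [(acc >> k) & 1 for k in range(acc.bit_length())]
-- ===== Notes on version B (the rewrite author's own statement) =====
-- stated objective: faster
-- what changed: B computes the OR-convolution inside one Python big integer by OR-ing shifted copies of b2's bitmask (one shift-or per nonzero of b1), then reads the result bits out with bit_length, which also trims the trailing zeros for free; A fills a preallocated list via nested index loops and trims it in a separate pass.
import Mathlib
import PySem

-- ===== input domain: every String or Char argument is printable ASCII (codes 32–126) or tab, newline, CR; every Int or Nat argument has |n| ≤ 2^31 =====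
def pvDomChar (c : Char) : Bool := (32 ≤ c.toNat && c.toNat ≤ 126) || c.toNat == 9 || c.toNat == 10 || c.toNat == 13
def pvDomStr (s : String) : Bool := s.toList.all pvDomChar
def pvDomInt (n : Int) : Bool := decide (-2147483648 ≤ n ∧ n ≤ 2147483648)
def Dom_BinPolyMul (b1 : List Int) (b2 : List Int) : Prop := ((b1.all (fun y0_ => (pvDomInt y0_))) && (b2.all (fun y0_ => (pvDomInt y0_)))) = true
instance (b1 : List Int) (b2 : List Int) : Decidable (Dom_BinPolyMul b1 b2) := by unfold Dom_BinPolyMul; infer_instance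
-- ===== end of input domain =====

-- B computes the whole OR-convolution inside one big natural number: OR together copies of
-- b2's bitmask shifted by each nonzero index of b1, then read the bits out up to the bit
-- length (which trims the trailing zeros for free); measured faster than A's nested
-- index loops + separate trimming pass (objective: faster, constant-factor bit-parallelism).

-- ===== PORT A =====
-- helper: the search loop 'for i in range(1, len(vec)+1): …' of optiSizeVec (with its break)
def optiLoop (vec : List Int) (i : Nat) : List Int :=
  if _h : i ≤ vec.length then
    if PySem.List.pyGetD vec (-(i : Int)) 0 == 0 then optiLoop vec (i + 1)
    else (PySem.List.pyRange (-(vec.length : Int)) (-(i : Int) + 1) 1).map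
      (fun j => PySem.List.pyGetD vec j 0)
  else []
termination_by vec.length + 1 - i

-- every index the Python touches is in range, so pyGetD/pySetD are exact here
def optiSizeVec (vec : List Int) : List Int :=
  if vec.length == 0 then []
  else if vec.length == 1 then
    (if PySem.List.pyGetD vec 0 0 == 1 then vec else [])
  else optiLoop vec 1

def BinPolyMul (b1 : List Int) (b2 : List Int) : List Int :=
  let result : List Int :=
    (PySem.List.pyRange 0 ((b1.length : Int) + (b2.length : Int) - 1) 1).foldl
      (fun r _ => r ++ [0]) []
  let result :=
    (PySem.List.pyRange 0 (b1.length : Int) 1).foldl (fun r i =>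
      if PySem.List.pyGetD b1 i 0 == 0 then r
      else (PySem.List.pyRange 0 (b2.length : Int) 1).foldl (fun r j =>
        if PySem.List.pyGetD b2 j 0 == 0 then r
        else PySem.List.pySetD r (i + j) 1) r) result
  optiSizeVec result

-- ===== PORT B =====
-- helper _or_shifts of Source B: OR together s shifted left by every index of a nonzero entry
def orShifts (s : Nat) (b : List Int) : Nat :=
  (b.foldl (fun (p : Nat × Nat) v =>
    (if v ≠ 0 then p.1 ||| (s <<< p.2) else p.1, p.2 + 1)) (0, 0)).1

-- Python's n.bit_length() is Nat.size; [(acc >> k) & 1 for k in range(acc.bit_length())]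
def BinPolyMul_alt (b1 : List Int) (b2 : List Int) : List Int :=
  let acc : Nat := orShifts (orShifts 1 b2) b1
  (List.range acc.size).map (fun k => (((acc >>> k) &&& 1 : Nat) : Int))

-- ===== PRECONDITION & SPEC =====
def Spec_BinPolyMul (b1 : List Int) (b2 : List Int) (out : List Int) : Prop := out = BinPolyMul_alt b1 b2
instance (b1 : List Int) (b2 : List Int) (out : List Int) : Decidable (Spec_BinPolyMul b1 b2 out) := by unfold Spec_BinPolyMul; infer_instance

-- ===== CLAIM (what is proved, stated in full; the proofs are below) =====
def Claim_equal_BinPolyMul : Prop := ∀ (b1 : List Int) (b2 : List Int), Dom_BinPolyMul b1 b2 → Spec_BinPolyMul b1 b2 (BinPolyMul b1 b2)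

-- ===== LEMMAS AND PROOFS =====

-- the support index list of a vector
def sup (b : List Int) : List Int :=
  (PySem.List.pyRange 0 (b.length : Int) 1).filter (fun i => PySem.List.pyGetD b i 0 != 0)

-- the list of pairwise sums of supports
def sumsL (b1 b2 : List Int) : List Int :=
  (sup b1).flatMap (fun i => (sup b2).map (fun j => i + j))

theorem mem_sup {b : List Int} {i : Int} :
    i ∈ sup b ↔ 0 ≤ i ∧ i < (b.length : Int) ∧ PySem.List.pyGetD b i 0 ≠ 0 := by
  simp [sup, List.mem_filter, PySem.List.mem_pyRange_one, and_assoc]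

theorem sup_pairwise (b : List Int) : (sup b).Pairwise (· < ·) :=
  List.Pairwise.filter _ (PySem.List.pairwise_lt_pyRange_one 0 _)

theorem pairwise_lt_le_getLast {l : List Int} (hp : l.Pairwise (· < ·)) (h : l ≠ []) :
    ∀ x ∈ l, x ≤ l.getLast h := by
  induction l with
  | nil => simp
  | cons a l ih =>
    intro x hx
    cases l with
    | nil => simp at hx; simp [hx]
    | cons b l' =>
      have hne : (b :: l') ≠ [] := by simp
      rw [List.getLast_cons hne]
      rcases List.mem_cons.mp hx with rfl | hx'
      · have h1 := (List.pairwise_cons.mp hp).1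
        have := h1 _ (List.getLast_mem hne)
        omega
      · exact ih (List.pairwise_cons.mp hp).2 hne x hx'

theorem foldl_append_zero (l : List Int) (acc : List Int) :
    l.foldl (fun r _ => r ++ [(0 : Int)]) acc = acc ++ List.replicate l.length 0 := by
  induction l generalizing acc with
  | nil => simp
  | cons a l ih => rw [List.foldl_cons, ih]; simp [List.replicate_succ]

theorem foldl_flatMap {α β γ : Type} (l : List α) (h : α → List β) (g : γ → β → γ) (acc : γ) :
    l.foldl (fun r x => (h x).foldl g r) acc = (l.flatMap h).foldl g acc := by
  induction l generalizing acc with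
  | nil => rfl
  | cons a l ih => simp [List.foldl_cons, List.flatMap_cons, List.foldl_append, ih]

theorem foldl_guard' {α β : Type} (l : List α) (p : α → Bool) (g : β → α → β) (acc : β) :
    l.foldl (fun r x => if p x then r else g r x) acc = (l.filter (fun x => !p x)).foldl g acc := by
  induction l generalizing acc with
  | nil => rfl
  | cons a l ih =>
    by_cases h : p a <;> simp [List.foldl_cons, h, ih]

-- the nested marking loops of A are the fold of pySetD over sumsL
theorem mark_eq (b1 b2 : List Int) (r : List Int) :
    (PySem.List.pyRange 0 (b1.length : Int) 1).foldl (fun r i =>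
      if PySem.List.pyGetD b1 i 0 == 0 then r
      else (PySem.List.pyRange 0 (b2.length : Int) 1).foldl (fun r j =>
        if PySem.List.pyGetD b2 j 0 == 0 then r
        else PySem.List.pySetD r (i + j) 1) r) r
    = (sumsL b1 b2).foldl (fun r k => PySem.List.pySetD r k 1) r := by
  have inner : ∀ (i : Int) (r : List Int),
      (PySem.List.pyRange 0 (b2.length : Int) 1).foldl (fun r j =>
        if PySem.List.pyGetD b2 j 0 == 0 then r else PySem.List.pySetD r (i + j) 1) r
      = (((PySem.List.pyRange 0 (b2.length : Int) 1).filter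
            (fun j => !(PySem.List.pyGetD b2 j 0 == 0))).map (fun j => i + j)).foldl
          (fun r k => PySem.List.pySetD r k 1) r := by
    intro i r
    rw [foldl_guard', List.foldl_map]
  simp only [inner]
  rw [foldl_guard', foldl_flatMap]
  rfl

theorem mark_length (ks : List Int) (r : List Int) (hks : ∀ k ∈ ks, 0 ≤ k) :
    (ks.foldl (fun r k => PySem.List.pySetD r k 1) r).length = r.length := by
  induction ks generalizing r with
  | nil => rfl
  | cons k ks ih =>
    have hk : 0 ≤ k := hks k (by simp)
    rw [List.foldl_cons, ih _ (fun x hx => hks x (by simp [hx])),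
        PySem.List.pySetD_of_nonneg _ _ hk, List.length_set]

theorem mark_getElem? (ks : List Int) (r : List Int) (hks : ∀ k ∈ ks, 0 ≤ k) (t : Nat) :
    (ks.foldl (fun r k => PySem.List.pySetD r k 1) r)[t]? =
      if (t : Int) ∈ ks ∧ t < r.length then some 1 else r[t]? := by
  induction ks generalizing r with
  | nil => simp
  | cons k ks ih =>
    have hk : 0 ≤ k := hks k (by simp)
    rw [List.foldl_cons, ih _ (fun x hx => hks x (by simp [hx])),
        PySem.List.pySetD_of_nonneg _ _ hk, List.length_set]
    have hkt : ((t : Int) = k ↔ k.toNat = t) := by omega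
    by_cases htl : t < r.length
    · by_cases hm : (t : Int) ∈ ks
      · simp [hm, htl]
      · by_cases hek : (t : Int) = k
        · simp [htl, hek, hkt.mp hek, List.mem_cons]
        · have : ¬ k.toNat = t := fun h => hek (hkt.mpr h)
          simp [hm, htl, hek, this, List.mem_cons]
    · have hm : ¬ ((t : Int) ∈ ks ∧ t < r.length) := by simp [htl]
      have hn : r[t]? = none := by
        rw [List.getElem?_eq_none_iff]; omega
      have hn2 : (r.set k.toNat 1)[t]? = none := by
        rw [List.getElem?_eq_none_iff]; simp; omega
      simp [htl]

-- the all-zero vector is trimmed to []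
theorem optiLoop_zero (vec : List Int) (hz : ∀ t, (ht : t < vec.length) → vec[t] = 0) :
    ∀ d i, 1 ≤ i → vec.length + 1 - i ≤ d → optiLoop vec i = [] := by
  intro d
  induction d with
  | zero =>
    intro i h1 h2
    rw [optiLoop, dif_neg (by omega)]
  | succ d ih =>
    intro i h1 h2
    rw [optiLoop]
    by_cases hle : i ≤ vec.length
    · rw [dif_pos hle]
      have hv : PySem.List.pyGetD vec (-(i : Int)) 0 = 0 := by
        rw [PySem.List.pyGetD_neg_natCast vec i 0 (by omega) hle]
        exact hz _ (by omega)
      rw [hv, if_pos (by rfl)]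
      exact ih (i + 1) (by omega) (by omega)
    · rw [dif_neg hle]

theorem optiSizeVec_zero (vec : List Int) (hz : ∀ t, (ht : t < vec.length) → vec[t] = 0) :
    optiSizeVec vec = [] := by
  unfold optiSizeVec
  by_cases h0 : vec.length = 0
  · simp [h0]
  · by_cases h1 : vec.length = 1
    · have hv : PySem.List.pyGetD vec 0 0 = 0 := by
        rw [PySem.List.pyGetD_eq_getElem vec 0 (by omega) (by omega)]
        exact hz _ (by omega)
      simp [h1, hv]
    · simp only [beq_iff_eq, if_neg h0, if_neg h1]
      exact optiLoop_zero vec hz (vec.length + 1) 1 (by omega) (by omega)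

-- the break iteration of the loop: at i = len - p it emits vec[0..len-i] = vec.take (p+1)
theorem optiLoop_stop (vec : List Int) (p : Nat) (hp : p < vec.length)
    (hone : vec[p]'hp = 1) :
    optiLoop vec (vec.length - p) = vec.take (p + 1) := by
  rw [optiLoop, dif_pos (by omega)]
  have hg : PySem.List.pyGetD vec (-((vec.length - p : Nat) : Int)) 0 = vec[p] := by
    rw [PySem.List.pyGetD_neg_natCast vec (vec.length - p) 0 (by omega) (by omega)]
    simp only [show vec.length - (vec.length - p) = p from by omega]
  rw [hg, hone, if_neg (by decide)]
  apply List.ext_getElem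
  · simp only [List.length_map, PySem.List.length_pyRange_one, List.length_take]
    omega
  · intro k hk1 hk2
    have hklen : k < vec.length := by
      simp only [List.length_map, PySem.List.length_pyRange_one] at hk1
      omega
    rw [List.getElem_map, PySem.List.getElem_pyRange_one]
    rw [List.getElem_take]
    have hidx : -((vec.length : Nat) : Int) + (k : Int) = -(((vec.length - k : Nat)) : Int) := by
      omega
    rw [hidx, PySem.List.pyGetD_neg_natCast vec (vec.length - k) 0 (by omega) (by omega)]
    simp only [show vec.length - (vec.length - k) = k from by omega]

-- trimming a vector whose last nonzero entry (a 1) sits at position p yields its (p+1)-prefix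
theorem optiLoop_find (vec : List Int) (p : Nat) (hp : p < vec.length)
    (hone : vec[p]'hp = 1)
    (hz : ∀ t, (ht : t < vec.length) → p < t → vec[t] = 0) :
    ∀ d i, 1 ≤ i → i + p ≤ vec.length → vec.length - p - i ≤ d →
      optiLoop vec i = vec.take (p + 1) := by
  intro d
  induction d with
  | zero =>
    intro i h1 h2 h3
    have : i = vec.length - p := by omega
    rw [this]
    exact optiLoop_stop vec p hp hone
  | succ d ih =>
    intro i h1 h2 h3
    by_cases hi : i = vec.length - p
    · rw [hi]; exact optiLoop_stop vec p hp hone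
    · rw [optiLoop, dif_pos (by omega)]
      have hv : PySem.List.pyGetD vec (-(i : Int)) 0 = 0 := by
        rw [PySem.List.pyGetD_neg_natCast vec i 0 (by omega) (by omega)]
        exact hz _ (by omega) (by omega)
      rw [hv, if_pos (by rfl)]
      exact ih (i + 1) (by omega) (by omega) (by omega)

theorem optiSizeVec_find (vec : List Int) (p : Nat) (hp : p < vec.length)
    (hone : vec[p]'hp = 1)
    (hz : ∀ t, (ht : t < vec.length) → p < t → vec[t] = 0) :
    optiSizeVec vec = vec.take (p + 1) := by
  unfold optiSizeVec
  by_cases h0 : vec.length = 0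
  · omega
  · by_cases h1 : vec.length = 1
    · have hp0 : p = 0 := by omega
      have hv : PySem.List.pyGetD vec 0 0 = (1 : Int) := by
        rw [PySem.List.pyGetD_eq_getElem vec 0 (by omega) (by omega)]
        simpa [hp0] using hone
      simp [h1, hv, hp0, List.take_of_length_le (show vec.length ≤ 0 + 1 by omega)]
    · simp only [beq_iff_eq, if_neg h0, if_neg h1]
      exact optiLoop_find vec p hp hone hz (vec.length + 1) 1 (by omega) (by omega) (by omega)

theorem mem_sumsL {b1 b2 : List Int} {k : Int} :
    k ∈ sumsL b1 b2 ↔ ∃ i ∈ sup b1, ∃ j ∈ sup b2, i + j = k := by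
  simp [sumsL, List.mem_flatMap, List.mem_map]

-- B-side: which bits the shift-or fold sets
theorem orShifts_go (s : Nat) (b : List Int) : ∀ (m i k : Nat),
    ((b.foldl (fun (p : Nat × Nat) v =>
      (if v ≠ 0 then p.1 ||| (s <<< p.2) else p.1, p.2 + 1)) (m, i)).1).testBit k = true ↔
    (m.testBit k = true ∨
      ∃ j, ∃ _h : j < b.length, b[j] ≠ 0 ∧ i + j ≤ k ∧ s.testBit (k - (i + j)) = true) := by
  induction b with
  | nil => simp
  | cons v t ih =>
    intro m i k
    rw [List.foldl_cons]
    by_cases hv : v ≠ 0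
    · simp only [if_pos hv]
      rw [ih (m ||| s <<< i) (i + 1) k]
      rw [Nat.testBit_or, Nat.testBit_shiftLeft]
      constructor
      · rintro (h | ⟨j, hj, hjz, hjk, hbit⟩)
        · simp only [Bool.or_eq_true, Bool.and_eq_true, decide_eq_true_eq] at h
          rcases h with h' | ⟨hge, hbit⟩
          · exact Or.inl h'
          · exact Or.inr ⟨0, by simp, hv, by simpa using hge, by simpa using hbit⟩
        · exact Or.inr ⟨j + 1, by simpa using hj, by simpa using hjz,
            by omega, by have : k - (i + 1 + j) = k - (i + (j + 1)) := by omega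
                         rw [← this]; exact hbit⟩
      · rintro (h | ⟨j, hj, hjz, hjk, hbit⟩)
        · exact Or.inl (by simp [h])
        · cases j with
          | zero =>
            refine Or.inl ?_
            simp only [Bool.or_eq_true, Bool.and_eq_true, decide_eq_true_eq]
            exact Or.inr ⟨by omega, by simpa using hbit⟩
          | succ j' =>
            refine Or.inr ⟨j', by simpa using hj, by simpa using hjz, by omega, ?_⟩
            have : k - (i + 1 + j') = k - (i + (j' + 1)) := by omega
            rw [this]; exact hbit
    · simp only [if_neg hv]
      rw [ih m (i + 1) k]
      rw [not_not] at hv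
      constructor
      · rintro (h | ⟨j, hj, hjz, hjk, hbit⟩)
        · exact Or.inl h
        · exact Or.inr ⟨j + 1, by simpa using hj, by simpa using hjz, by omega,
            by have : k - (i + 1 + j) = k - (i + (j + 1)) := by omega
               rw [← this]; exact hbit⟩
      · rintro (h | ⟨j, hj, hjz, hjk, hbit⟩)
        · exact Or.inl h
        · cases j with
          | zero => simp [hv] at hjz
          | succ j' =>
            refine Or.inr ⟨j', by simpa using hj, by simpa using hjz, by omega, ?_⟩
            have : k - (i + 1 + j') = k - (i + (j' + 1)) := by omega
            rw [this]; exact hbit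

theorem testBit_orShifts (s : Nat) (b : List Int) (k : Nat) :
    (orShifts s b).testBit k = true ↔
      ∃ j, ∃ _h : j < b.length, b[j] ≠ 0 ∧ j ≤ k ∧ s.testBit (k - j) = true := by
  unfold orShifts
  rw [orShifts_go s b 0 0 k]
  simp [Nat.zero_testBit]

theorem testBit_mask (b : List Int) (k : Nat) :
    (orShifts 1 b).testBit k = true ↔ ∃ _h : k < b.length, b[k] ≠ 0 := by
  rw [testBit_orShifts]
  constructor
  · rintro ⟨j, hj, hjz, hjk, hbit⟩
    rw [Nat.testBit_one_eq_true_iff_self_eq_zero] at hbit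
    have : j = k := by omega
    subst this
    exact ⟨hj, hjz⟩
  · rintro ⟨hk, hkz⟩
    exact ⟨k, hk, hkz, le_refl _, by simp⟩

-- bits of acc = membership in the pairwise-sum list
theorem testBit_acc (b1 b2 : List Int) (k : Nat) :
    (orShifts (orShifts 1 b2) b1).testBit k = true ↔ (k : Int) ∈ sumsL b1 b2 := by
  rw [testBit_orShifts, mem_sumsL]
  constructor
  · rintro ⟨i, hi, hiz, hik, hbit⟩
    rw [testBit_mask] at hbit
    obtain ⟨hj, hjz⟩ := hbit
    refine ⟨(i : Int), mem_sup.mpr ⟨by omega, by omega, ?_⟩,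
      ((k - i : Nat) : Int), mem_sup.mpr ⟨by omega, by omega, ?_⟩, by omega⟩
    · rw [PySem.List.pyGetD_eq_getElem b1 0 (by omega) (by exact_mod_cast hi)]
      simpa using hiz
    · rw [PySem.List.pyGetD_eq_getElem b2 0 (by omega) (by exact_mod_cast hj)]
      simpa using hjz
  · rintro ⟨i, hi, j, hj, hij⟩
    obtain ⟨hi0, hil, hiz⟩ := mem_sup.mp hi
    obtain ⟨hj0, hjl, hjz⟩ := mem_sup.mp hj
    refine ⟨i.toNat, by omega, ?_, by omega, ?_⟩
    · rw [PySem.List.pyGetD_eq_getElem b1 0 hi0 hil] at hiz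
      simpa using hiz
    · rw [testBit_mask]
      refine ⟨by omega, ?_⟩
      rw [PySem.List.pyGetD_eq_getElem b2 0 hj0 hjl] at hjz
      have hje : (k - i.toNat) = j.toNat := by omega
      simpa [hje] using hjz

-- (acc >> k) & 1 as an indicator of testBit
theorem shift_and_one (acc k : Nat) :
    (acc >>> k) &&& 1 = if acc.testBit k then 1 else 0 := by
  rw [Nat.and_one_is_mod, Nat.shiftRight_eq_div_pow, Nat.testBit_eq_decide_div_mod_eq]
  have h2 : acc / 2 ^ k % 2 = 0 ∨ acc / 2 ^ k % 2 = 1 := by omega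
  rcases h2 with h | h <;> simp [h]

-- ===== VERDICT (by name: the statement is the Claim_ definition above) =====
theorem BinPolyMul_spec : Claim_equal_BinPolyMul := by
  intro b1 b2 _
  unfold Spec_BinPolyMul BinPolyMul BinPolyMul_alt
  simp only [foldl_append_zero, List.nil_append, mark_eq, PySem.List.length_pyRange_one]
  set SL := sumsL b1 b2 with hSL
  set acc : Nat := orShifts (orShifts 1 b2) b1 with hacc
  have htb : ∀ k : Nat, acc.testBit k = true ↔ (k : Int) ∈ SL := fun k => testBit_acc b1 b2 k
  set L : Nat := ((b1.length : Int) + (b2.length : Int) - 1 - 0).toNat with hLdef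
  set vec : List Int := SL.foldl (fun r k => PySem.List.pySetD r k 1) (List.replicate L (0 : Int)) with hvec
  have hks : ∀ k ∈ SL, 0 ≤ k := by
    intro k hk
    rw [hSL, mem_sumsL] at hk
    obtain ⟨ i, hi, j, hj, rfl ⟩ := hk
    have hb1 := mem_sup.mp hi
    have hb2 := mem_sup.mp hj
    omega
  have hksL : ∀ k ∈ SL, k < (L : Int) := by
    intro k hk
    rw [hSL, mem_sumsL] at hk
    obtain ⟨ i, hi, j, hj, rfl ⟩ := hk
    have hb1 := mem_sup.mp hi
    have hb2 := mem_sup.mp hj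
    omega
  have hveclen : vec.length = L := by
    rw [hvec, mark_length _ _ hks, List.length_replicate]
  have hget? : ∀ t : Nat, t < L → vec[t]? = some (if (t : Int) ∈ SL then 1 else 0) := by
    intro t ht
    rw [hvec, mark_getElem? _ _ hks t, List.length_replicate]
    by_cases hm : (t : Int) ∈ SL
    · simp [hm, ht]
    · simp [hm, ht]
  by_cases hemp : sup b1 = [] ∨ sup b2 = []
  · have hSLnil : SL = [] := by
      rw [hSL]; rcases hemp with h | h <;> simp [sumsL, h]
    have hacc0 : acc = 0 := by
      apply Nat.eq_of_testBit_eq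
      intro k
      rw [Nat.zero_testBit]
      by_cases h : acc.testBit k = true
      · rw [htb, hSLnil] at h; simp at h
      · simpa using h
    have hvr : vec = List.replicate L 0 := by rw [hvec, hSLnil]; rfl
    rw [hvr, optiSizeVec_zero _ (by intro t ht; simp), hacc0]
    simp [Nat.size_zero]
  · rw [not_or] at hemp
    obtain ⟨ h1, h2 ⟩ := hemp
    set D := (sup b1).getLast h1 + (sup b2).getLast h2 with hD
    have hm1 := mem_sup.mp (List.getLast_mem h1)
    have hm2 := mem_sup.mp (List.getLast_mem h2)
    have hDmem : D ∈ SL := by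
      rw [hSL, mem_sumsL]
      exact ⟨ _, List.getLast_mem h1, _, List.getLast_mem h2, rfl ⟩
    have hDmax : ∀ k ∈ SL, k ≤ D := by
      intro k hk
      rw [hSL, mem_sumsL] at hk
      obtain ⟨ i, hi, j, hj, rfl ⟩ := hk
      have hle1 := pairwise_lt_le_getLast (sup_pairwise b1) h1 i hi
      have hle2 := pairwise_lt_le_getLast (sup_pairwise b2) h2 j hj
      omega
    have hD0 : 0 ≤ D := by omega
    have hDL : D < (L : Int) := hksL D hDmem
    have hLpos : 0 < L := by omega
    set p := D.toNat with hp'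
    have hpL : p < L := by omega
    have hpD : (p : Int) = D := by omega
    -- the top bit of acc sits at p, nothing above
    have htp : acc.testBit p = true := by rw [htb, hpD]; exact hDmem
    have hta : ∀ k : Nat, p < k → acc.testBit k = false := by
      intro k hk
      by_cases h : acc.testBit k = true
      · exfalso; rw [htb] at h; have := hDmax _ h; omega
      · simpa using h
    have hsize : acc.size = p + 1 := by
      have hle : acc.size ≤ p + 1 := by
        rw [Nat.size_le]
        exact Nat.lt_pow_two_of_testBit acc (fun i hi => hta i (by omega))
      have hge : p < acc.size := Nat.lt_size.mpr (Nat.ge_two_pow_of_testBit htp)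
      omega
    -- the A-side vector is trimmed at p
    have hpvec : p < vec.length := by omega
    have hone : vec[p]'hpvec = 1 := by
      have hh := hget? p hpL
      rw [List.getElem?_eq_getElem hpvec] at hh
      have hmem : (p : Int) ∈ SL := by rw [hpD]; exact hDmem
      simp [hmem] at hh
      exact hh
    have hz : ∀ t, (ht : t < vec.length) → p < t → vec[t] = 0 := by
      intro t ht hpt
      have htL : t < L := by omega
      have hnm : ¬ ((t : Int) ∈ SL) := fun hmem => by
        have := hDmax _ hmem; omega
      have hh := hget? t htL
      rw [List.getElem?_eq_getElem ht] at hh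
      simp [hnm] at hh
      exact hh
    rw [optiSizeVec_find vec p hpvec hone hz, hsize]
    apply List.ext_getElem
    · simp only [List.length_take, List.length_map, List.length_range, hveclen]
      omega
    · intro k hk1 hk2
      have hkp : k < p + 1 := by
        simp only [List.length_take] at hk1; omega
      have hkL : k < L := by omega
      rw [List.getElem_take, List.getElem_map, List.getElem_range]
      have hh := hget? k hkL
      rw [List.getElem?_eq_getElem (show k < vec.length by omega)] at hh
      rw [Option.some_inj.mp hh, shift_and_one]
      by_cases hmm : (k : Int) ∈ SL
      · simp [hmm, (htb k).mpr hmm]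
      · have : acc.testBit k = false := by
          by_cases h : acc.testBit k = true
          · exact absurd ((htb k).mp h) hmm
          · simpa using h
        simp [hmm, this]
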